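-- pv_equiv track=rewrite | github.com/ommadawn46/win-x86-shellcoder | coder/util.py | push_string
-- ===== SOURCE A (Python) =====
-- def convert_neg(dword):
--     return ((-int.from_bytes(dword, "little")) & 0xFFFFFFFF).to_bytes(4, "little")
--
-- def push_string(input_str, bad_chars):
--     def gen_push_code(dword):
--         if not any(c in bad_chars for c in dword):
--             return f'push  {hex(int.from_bytes(dword, "little"))};'
--
--     def gen_neg_code(dword):
--         neg_dword = convert_neg(dword)
--         if not any(c in bad_chars for c in neg_dword):
--             return (
--                 f'mov   eax, {hex(int.from_bytes(neg_dword, "little"))};'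
--                 f"neg   eax;"
--                 f"push  eax;"
--             )
--
--     def gen_xor_code(dword):
--         xor_dword_1 = xor_dword_2 = b""
--         for i in range(4):
--             for xor_byte_1 in range(256):
--                 xor_byte_2 = dword[i] ^ xor_byte_1
--                 if (xor_byte_1 not in bad_chars) and (xor_byte_2 not in bad_chars):
--                     xor_dword_1 += bytes([xor_byte_1])
--                     xor_dword_2 += bytes([xor_byte_2])
--                     break
--             else:
--                 return None
--
--         return (
--             f'mov   eax, {hex(int.from_bytes(xor_dword_1, "little"))};'
--             f'xor   eax, {hex(int.from_bytes(xor_dword_2, "little"))};'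
--             f"push  eax;"
--         )
--
--     input_bytes = input_str.encode() + b"\x00"
--
--     code = ""
--     for i in range(0, len(input_bytes), 4)[::-1]:
--         pad_byte = [c for c in range(256) if c not in bad_chars][0]
--         dword = input_bytes[i : i + 4]
--         dword += bytes([pad_byte]) * (4 - len(dword))
--
--         new_code = gen_push_code(dword)
--         if not new_code:
--             new_code = gen_neg_code(dword)
--         if not new_code:
--             new_code = gen_xor_code(dword)
--         if not new_code:
--             raise Exception(f"cannot push dword: {dword}")
--         code += new_code
--
--     return code
-- ===== SOURCE B (Python) =====
-- def push_string(input_str, bad_chars):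
--     bad = set(bad_chars)
--     good = [c for c in range(256) if c not in bad]
--     pad_byte = good[0]
--
--     # precomputed: first (x, v^x) pair with both bytes good, for every byte value v
--     xor_pair = []
--     for v in range(256):
--         pair = None
--         for x in good:
--             if (v ^ x) not in bad:
--                 pair = (x, v ^ x)
--                 break
--         xor_pair.append(pair)
--
--     def le(bs):
--         return int.from_bytes(bs, "little")
--
--     def code_for(dword):
--         if all(c not in bad for c in dword):
--             return f'push  {hex(le(dword))};'
--         neg = ((-le(dword)) & 0xFFFFFFFF).to_bytes(4, "little")
--         if all(c not in bad for c in neg):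
--             return f'mov   eax, {hex(le(neg))};neg   eax;push  eax;'
--         pairs = [xor_pair[c] for c in dword]
--         if all(p is not None for p in pairs):
--             x1 = le(bytes(p[0] for p in pairs))
--             x2 = le(bytes(p[1] for p in pairs))
--             return f'mov   eax, {hex(x1)};xor   eax, {hex(x2)};push  eax;'
--         raise Exception(f"cannot push dword: {dword}")
--
--     data = input_str.encode() + b"\x00"
--     dwords = [
--         (data[i:i + 4] + bytes([pad_byte]) * 4)[:4]
--         for i in range(0, len(data), 4)
--     ]
--     return "".join(code_for(d) for d in reversed(dwords))
-- ===== Notes on version B (the rewrite author's own statement) =====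
-- stated objective: faster
-- what changed: B precomputes the good-byte list/pad once and a 256-entry table mapping each byte value to its first good (xor_byte_1, xor_byte_2) pair, chunks the input into padded dwords up front, and joins the per-dword codes over the reversed chunk list, so the per-dword 256-value pad rescan and the per-byte 256-iteration xor scan disappear.
import Mathlib
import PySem

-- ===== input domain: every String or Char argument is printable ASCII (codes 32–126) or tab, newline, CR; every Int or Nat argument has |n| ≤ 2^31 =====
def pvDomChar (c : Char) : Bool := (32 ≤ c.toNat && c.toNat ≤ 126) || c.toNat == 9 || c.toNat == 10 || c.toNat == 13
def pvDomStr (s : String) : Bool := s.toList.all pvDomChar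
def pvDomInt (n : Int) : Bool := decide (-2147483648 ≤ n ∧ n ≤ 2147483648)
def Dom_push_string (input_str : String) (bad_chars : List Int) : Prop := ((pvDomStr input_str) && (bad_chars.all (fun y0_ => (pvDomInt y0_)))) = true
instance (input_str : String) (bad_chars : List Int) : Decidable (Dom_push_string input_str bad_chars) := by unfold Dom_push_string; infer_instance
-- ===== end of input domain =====

-- B precomputes the pad byte and a 256-entry xor-pair table once instead of re-scanning 0..255
-- per dword / per byte; measured faster by a constant factor. Equivalence is on the return value;
-- inputs where A raises (no pad byte, or an unencodable dword) are excluded by Pre_push_string.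

-- shared byte-level helpers (both Pythons perform the same arithmetic and formatting)
def pvIsBad (bad : List Int) (c : Nat) : Bool := bad.contains (c : Int)

-- int.from_bytes(bs, "little")
def pvLE (bs : List Nat) : Nat := bs.foldr (fun b acc => b + 256 * acc) 0

-- hex(n) for n ≥ 0
def pvHex (n : Nat) : String := "0x" ++ String.ofList (Nat.toDigits 16 n)

-- convert_neg: ((-int.from_bytes(d)) & 0xFFFFFFFF).to_bytes(4, "little"); exact for the 4-byte values it is applied to
def pvNeg (d : List Nat) : List Nat :=
  let n := (4294967296 - pvLE d % 4294967296) % 4294967296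
  [n % 256, n / 256 % 256, n / 65536 % 256, n / 16777216 % 256]

-- input_str.encode() + b"\x00" (encode() is the identity on the ASCII domain Dom)
def pvBytes (s : String) : List Nat := s.toList.map Char.toNat ++ [0]

-- [c for c in range(256) if c not in bad_chars] (A builds it per iteration, B once)
def pvGoods (bad : List Int) : List Nat := (List.range 256).filter (fun c => ! pvIsBad bad c)

-- ===== PORT A =====

def pvGenPush (bad : List Int) (d : List Nat) : Option String :=
  if d.any (fun c => pvIsBad bad c) then none
  else some ("push  " ++ pvHex (pvLE d) ++ ";")

def pvGenNeg (bad : List Int) (d : List Nat) : Option String :=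
  let nd := pvNeg d
  if nd.any (fun c => pvIsBad bad c) then none
  else some ("mov   eax, " ++ pvHex (pvLE nd) ++ ";" ++ "neg   eax;" ++ "push  eax;")

-- inner 'for xor_byte_1 in range(256): … break / else' of gen_xor_code
def pvScanXor (bad : List Int) (b : Nat) : Option (Nat × Nat) :=
  (List.range 256).findSome? (fun x =>
    if (! pvIsBad bad x) && (! pvIsBad bad (b ^^^ x)) then some (x, b ^^^ x) else none)

-- gen_xor_code: builds xor_dword_1/xor_dword_2 byte by byte, None as soon as a byte has no pair
def pvGenXor (bad : List Int) (d : List Nat) : Option String :=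
  match (List.range 4).foldl
      (fun (acc : Option (List Nat × List Nat)) i => acc.bind (fun p =>
        match PySem.List.pyGet? d (i : Int) with
        | none => none
        | some b =>
          match pvScanXor bad b with
          | none => none
          | some xy => some (p.1 ++ [xy.1], p.2 ++ [xy.2])))
      (some (([] : List Nat), ([] : List Nat))) with
  | none => none
  | some p =>
    some ("mov   eax, " ++ pvHex (pvLE p.1) ++ ";" ++ "xor   eax, " ++ pvHex (pvLE p.2) ++ ";" ++ "push  eax;")

-- the 'new_code = …; if not new_code: …' cascade of A's loop body
def pvChain (bad : List Int) (d : List Nat) : Option String :=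
  match pvGenPush bad d with
  | some s => some s
  | none =>
    match pvGenNeg bad d with
    | some s => some s
    | none => pvGenXor bad d

def push_string (input_str : String) (bad_chars : List Int) : String :=
  let input_bytes := pvBytes input_str
  let r := ((PySem.List.pyRange 0 (input_bytes.length : Int) 4).reverse).foldl
    (fun (acc : Option String) (i : Int) => acc.bind (fun code =>
      match (pvGoods bad_chars).head? with
      | none => none  -- IndexError picking pad_byte (every byte value bad): outside Pre_
      | some pad =>
        let sl := PySem.List.slice input_bytes (some i) (some (i + 4))
        let dword := sl ++ List.replicate (4 - sl.length) pad
        match pvChain bad_chars dword with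
        | none => none  -- raise Exception("cannot push dword: …"): outside Pre_
        | some nc => some (code ++ nc)))
    (some "")
  match r with
  | some s => s
  | none => ""  -- unreachable inside Pre_ (A raised)

-- ===== PORT B =====

-- xor_pair: for every byte value v, the first (x, v ^ x) with both bytes good, scanning the good bytes
def pvXorTable (bad : List Int) : List (Option (Nat × Nat)) :=
  (List.range 256).map (fun v =>
    (pvGoods bad).findSome? (fun x =>
      if ! pvIsBad bad (v ^^^ x) then some (x, v ^^^ x) else none))

def pvCodeFor (bad : List Int) (table : List (Option (Nat × Nat))) (d : List Nat) : Option String :=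
  if d.all (fun c => ! pvIsBad bad c) then
    some ("push  " ++ pvHex (pvLE d) ++ ";")
  else if (pvNeg d).all (fun c => ! pvIsBad bad c) then
    some ("mov   eax, " ++ pvHex (pvLE (pvNeg d)) ++ ";neg   eax;push  eax;")
  else
    -- xor_pair[c] never sees c ≥ 256 in Python (bytes are < 256), so getD is exact here
    let pairs := d.map (fun c => table.getD c none)
    if pairs.all (fun p => p.isSome) then
      some ("mov   eax, " ++ pvHex (pvLE (pairs.map (fun p => (p.getD (0, 0)).1))) ++ ";xor   eax, "
            ++ pvHex (pvLE (pairs.map (fun p => (p.getD (0, 0)).2))) ++ ";push  eax;")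
    else none  -- raise Exception: outside Pre_

-- "".join(code_for(d) for d in reversed(dwords)), with the raise propagated as none
def pvJoinRev (bad : List Int) (table : List (Option (Nat × Nat))) : List (List Nat) → Option String
  | [] => some ""
  | d :: ds =>
    match pvCodeFor bad table d, pvJoinRev bad table ds with
    | some s, some rest => some (s ++ rest)
    | _, _ => none

def push_string_alt (input_str : String) (bad_chars : List Int) : String :=
  match (pvGoods bad_chars).head? with
  | none => ""  -- good[0] raises IndexError: outside Pre_
  | some pad =>
    let table := pvXorTable bad_chars
    let data := pvBytes input_str
    let dwords := (PySem.List.pyRange 0 (data.length : Int) 4).map (fun i =>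
      (PySem.List.slice data (some i) (some (i + 4)) ++ List.replicate 4 pad).take 4)
    match pvJoinRev bad_chars table dwords.reverse with
    | some s => s
    | none => ""  -- unreachable inside Pre_ (B raised)

-- ===== PRECONDITION & SPEC =====

-- the i-th padded dword of the message (pad byte = first byte value not in bad_chars)
def pvDwordAt (input_str : String) (bad_chars : List Int) (i : Int) : List Nat :=
  (PySem.List.slice (pvBytes input_str) (some i) (some (i + 4))
    ++ List.replicate 4 ((pvGoods bad_chars).headD 0)).take 4

-- Pre_ excludes exactly the inputs on which A raises: all 256 byte values bad (IndexError picking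
-- pad_byte) or some padded dword no strategy encodes (its bytes not all good, the bytes of its
-- 32-bit negation not all good, and some byte of it without a good xor pair) — the explicit raise.
def Pre_push_string (input_str : String) (bad_chars : List Int) : Prop :=
  pvGoods bad_chars ≠ [] ∧
  ∀ i ∈ PySem.List.pyRange 0 ((pvBytes input_str).length : Int) 4,
    (pvDwordAt input_str bad_chars i).all (fun c => ! pvIsBad bad_chars c) = true ∨
    (pvNeg (pvDwordAt input_str bad_chars i)).all (fun c => ! pvIsBad bad_chars c) = true ∨
    ∀ b ∈ pvDwordAt input_str bad_chars i,
      ∃ x ∈ List.range 256, ((! pvIsBad bad_chars x) && (! pvIsBad bad_chars (b ^^^ x))) = true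

instance (input_str : String) (bad_chars : List Int) : Decidable (Pre_push_string input_str bad_chars) := by
  unfold Pre_push_string; infer_instance

def pvWitness_push_string : String × List Int := ("hi", [0, 104])

def Spec_push_string (input_str : String) (bad_chars : List Int) (out : String) : Prop :=
  out = push_string_alt input_str bad_chars

instance (input_str : String) (bad_chars : List Int) (out : String) : Decidable (Spec_push_string input_str bad_chars out) := by
  unfold Spec_push_string; infer_instance

-- ===== CLAIM (what is proved, stated in full; the proofs are below) =====
def Claim_equal_push_string : Prop := ∀ (input_str : String) (bad_chars : List Int), Dom_push_string input_str bad_chars → Pre_push_string input_str bad_chars → Spec_push_string input_str bad_chars (push_string input_str bad_chars)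

-- ===== LEMMAS AND PROOFS =====

theorem pv_findSome?_filter {β : Type} (p : Nat → Bool) (f : Nat → Option β) :
    ∀ (l : List Nat), (l.filter p).findSome? f = l.findSome? (fun x => if p x then f x else none) := by
  intro l
  induction l with
  | nil => rfl
  | cons a l ih =>
    by_cases h : p a = true
    · cases hf : f a <;> simp [h, hf, ih]
    · simp only [Bool.not_eq_true] at h
      simp [h, ih]

theorem pv_table_getD (bad : List Int) (b : Nat) (hb : b < 256) :
    (pvXorTable bad).getD b none = pvScanXor bad b := by
  unfold pvXorTable pvScanXor pvGoods
  rw [List.getD_eq_getElem?_getD, List.getElem?_map, List.getElem?_range hb]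
  simp only [Option.map_some, Option.getD_some]
  rw [pv_findSome?_filter]
  congr 1
  funext x
  by_cases h1 : pvIsBad bad x <;> by_cases h2 : pvIsBad bad (b ^^^ x) <;> simp [h1, h2]

theorem pv_pad4_eq {α : Type} (l : List α) (pad : α) (h : l.length ≤ 4) :
    (l ++ List.replicate 4 pad).take 4 = l ++ List.replicate (4 - l.length) pad := by
  rw [List.take_append, List.take_of_length_le h, List.take_replicate, min_eq_left (by omega)]

theorem pv_chain_eq (bad : List Int) (d : List Nat) (hlen : d.length = 4)
    (hb : ∀ b ∈ d, b < 256) :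
    pvChain bad d = pvCodeFor bad (pvXorTable bad) d := by
  match d, hlen with
  | [b0, b1, b2, b3], _ =>
    have h0 := hb b0 (by simp)
    have h1 := hb b1 (by simp)
    have h2 := hb b2 (by simp)
    have h3 := hb b3 (by simp)
    unfold pvChain pvGenPush pvGenNeg pvCodeFor
    rw [List.any_eq_not_all_not]
    cases hP : [b0, b1, b2, b3].all (fun c => ! pvIsBad bad c) with
    | true => simp
    | false =>
      simp only [Bool.not_false, if_true]
      rw [List.any_eq_not_all_not]
      cases hQ : (pvNeg [b0, b1, b2, b3]).all (fun c => ! pvIsBad bad c) with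
      | true => simp [String.append_assoc]
      | false =>
        simp only [Bool.not_false, if_true]
        unfold pvGenXor
        have hr : List.range 4 = [0, 1, 2, 3] := rfl
        rw [hr]
        simp only [List.map_cons, List.map_nil,
          pv_table_getD bad b0 h0, pv_table_getD bad b1 h1,
          pv_table_getD bad b2 h2, pv_table_getD bad b3 h3]
        cases hx0 : pvScanXor bad b0 with
        | none => simp [hx0]
        | some p0 =>
          cases hx1 : pvScanXor bad b1 with
          | none => simp [hx0, hx1]
          | some p1 =>
            cases hx2 : pvScanXor bad b2 with
            | none => simp [hx0, hx1, hx2]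
            | some p2 =>
              cases hx3 : pvScanXor bad b3 with
              | none => simp [hx0, hx1, hx2, hx3]
              | some p3 => simp [hx0, hx1, hx2, hx3, String.append_assoc]

theorem pv_foldl_bind_none {α β : Type} (f : α → β → Option β) :
    ∀ (L : List α), L.foldl (fun (a : Option β) x => a.bind (f x ·)) none = none := by
  intro L
  induction L with
  | nil => rfl
  | cons a L ih => simpa using ih

theorem pv_fold_join (bad : List Int) (table : List (Option (Nat × Nat))) :
    ∀ (L : List (List Nat)) (acc : String),
      L.foldl (fun (a : Option String) d => a.bind (fun code =>
          match pvCodeFor bad table d with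
          | none => none
          | some nc => some (code ++ nc))) (some acc)
        = (pvJoinRev bad table L).map (fun s => acc ++ s) := by
  intro L
  induction L with
  | nil => intro acc; simp [pvJoinRev]
  | cons d ds ih =>
    intro acc
    cases hc : pvCodeFor bad table d with
    | none =>
      simp only [List.foldl_cons, Option.bind_some, hc]
      rw [pv_foldl_bind_none (fun d code =>
        match pvCodeFor bad table d with
        | none => none
        | some nc => some (code ++ nc))]
      simp [pvJoinRev, hc]
    | some nc =>
      simp only [List.foldl_cons, Option.bind_some, hc]
      rw [ih (acc ++ nc)]
      rw [pvJoinRev]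
      rw [hc]
      cases h2 : pvJoinRev bad table ds <;> simp [String.append_assoc]

theorem pv_dom_bytes_lt (input_str : String) (bad_chars : List Int)
    (hDom : Dom_push_string input_str bad_chars) :
    ∀ b ∈ pvBytes input_str, b < 256 := by
  intro b hbmem
  unfold Dom_push_string at hDom
  simp only [Bool.and_eq_true] at hDom
  have hstr := hDom.1
  unfold pvDomStr at hstr
  unfold pvBytes at hbmem
  rcases List.mem_append.mp hbmem with h | h
  · rcases List.mem_map.mp h with ⟨c, hc, rfl⟩
    have := List.all_eq_true.mp hstr c hc
    unfold pvDomChar at this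
    simp only [Bool.or_eq_true, Bool.and_eq_true, decide_eq_true_eq, beq_iff_eq] at this
    omega
  · simp only [List.mem_singleton] at h
    omega

theorem pv_pad_lt (bad : List Int) (pad : Nat) (hg : (pvGoods bad).head? = some pad) :
    pad < 256 := by
  rcases List.head?_eq_some_iff.mp hg with ⟨ys, hys⟩
  have hmem : pad ∈ pvGoods bad := by rw [hys]; exact List.mem_cons_self
  unfold pvGoods at hmem
  have := List.mem_filter.mp hmem
  exact List.mem_range.mp this.1

-- ===== VERDICT (by name: the statement is the Claim_ definition above) =====
theorem push_string_spec : Claim_equal_push_string := by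
  unfold Claim_equal_push_string
  intro input_str bad_chars hDom _hPre
  unfold Spec_push_string push_string push_string_alt
  cases hg : (pvGoods bad_chars).head? with
  | none =>
    simp only [hg]
    cases hM : (PySem.List.pyRange 0 ((pvBytes input_str).length : Int) 4).reverse with
    | nil => simp
    | cons i M' =>
      simp only [List.foldl_cons, Option.bind_some]
      rw [pv_foldl_bind_none (fun (_ : Int) (_ : String) => (none : Option String))]
  | some pad =>
    simp only [hg]
    have hpad : pad < 256 := pv_pad_lt bad_chars pad hg
    have hbytes := pv_dom_bytes_lt input_str bad_chars hDom
    -- rewrite A's loop body into B's per-dword code on every index of the range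
    rw [PySem.List.foldl_congr_mem _ _
      (fun (acc : Option String) (i : Int) => acc.bind (fun code =>
        match pvCodeFor bad_chars (pvXorTable bad_chars)
            ((PySem.List.slice (pvBytes input_str) (some i) (some (i + 4))
              ++ List.replicate 4 pad).take 4) with
        | none => none
        | some nc => some (code ++ nc))) _ ?_]
    · rw [← List.foldl_map
        (f := fun i => (PySem.List.slice (pvBytes input_str) (some i) (some (i + 4))
              ++ List.replicate 4 pad).take 4)
        (g := fun (a : Option String) d => a.bind (fun code =>
          match pvCodeFor bad_chars (pvXorTable bad_chars) d with
          | none => none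
          | some nc => some (code ++ nc)))]
      rw [List.map_reverse]
      rw [pv_fold_join]
      cases pvJoinRev bad_chars (pvXorTable bad_chars)
          (((PySem.List.pyRange 0 ((pvBytes input_str).length : Int) 4).map (fun i =>
            (PySem.List.slice (pvBytes input_str) (some i) (some (i + 4))
              ++ List.replicate 4 pad).take 4)).reverse) with
      | none => rfl
      | some s => simp
    · intro acc i hi
      have hi' : i ∈ PySem.List.pyRange 0 ((pvBytes input_str).length : Int) 4 :=
        List.mem_reverse.mp hi
      have hinn := (PySem.List.mem_pyRange_iff_of_pos (by norm_num) i).mp hi'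
      have h0i : 0 ≤ i := hinn.1
      have hsl : PySem.List.slice (pvBytes input_str) (some i) (some (i + 4))
          = List.take ((i + 4).toNat - i.toNat) (List.drop i.toNat (pvBytes input_str)) :=
        PySem.List.slice_toNat _ h0i (by omega)
      have hsl4 : (PySem.List.slice (pvBytes input_str) (some i) (some (i + 4))).length ≤ 4 := by
        rw [hsl]
        have h4 : (i + 4).toNat - i.toNat = 4 := by omega
        rw [h4]
        exact (List.length_take_le _ _)
      dsimp only
      set sl := PySem.List.slice (pvBytes input_str) (some i) (some (i + 4)) with hsldef
      have hdw : (sl ++ List.replicate 4 pad).take 4 = sl ++ List.replicate (4 - sl.length) pad :=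
        pv_pad4_eq sl pad hsl4
      have hlen : (sl ++ List.replicate (4 - sl.length) pad).length = 4 := by
        rw [List.length_append, List.length_replicate]; omega
      have hballb : ∀ b ∈ sl ++ List.replicate (4 - sl.length) pad, b < 256 := by
        intro b hbm
        rcases List.mem_append.mp hbm with h | h
        · exact hbytes b (PySem.List.mem_of_mem_slice _ _ _ (hsldef ▸ h))
        · rw [List.eq_of_mem_replicate h]; exact hpad
      rw [hdw, pv_chain_eq bad_chars _ hlen hballb]
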